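-- pv_equiv track=rewrite | github.com/MrBrantCode/unitest_baseline | mut_generate/mist_train_taco/taco_12832/solution.py | calculate_occupied_houses
-- ===== SOURCE A (Python) =====
-- def calculate_occupied_houses(n, coordinates):
--     coordinates.sort()
--     unique_coordinates = sorted(set(coordinates))
--
--     # Calculate minimum number of occupied houses
--     min_occupied = 0
--     i = 0
--     len_unique = len(unique_coordinates)
--     while i < len_unique:
--         if i - 1 >= 0 and unique_coordinates[i] - unique_coordinates[i - 1] == 1:
--             unique_coordinates[i] = unique_coordinates[i - 1]
--         elif i + 1 < len_unique:
--             dif = unique_coordinates[i + 1] - unique_coordinates[i]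
--             if dif == 1:
--                 unique_coordinates[i] = unique_coordinates[i + 1]
--                 i += 1
--             elif dif == 2:
--                 unique_coordinates[i] = unique_coordinates[i + 1] = unique_coordinates[i] + 1
--                 i += 1
--         i += 1
--     min_occupied = len(set(unique_coordinates))
--
--     # Calculate maximum number of occupied houses
--     last = -1
--     max_occupied = set()
--     for coord in coordinates:
--         if coord == last:
--             last = coord + 1
--             max_occupied.add(last)
--         elif coord > last:
--             if coord - 1 != last:
--                 last = coord - 1
--                 max_occupied.add(last)
--             else:
--                 last = coord
--                 max_occupied.add(last)
--     max_occupied = len(max_occupied)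
--
--     return min_occupied, max_occupied
-- ===== SOURCE B (Python) =====
-- def calculate_occupied_houses(n, coordinates):
--     coordinates.sort()  # keep A's in-place sort side effect
--     unique = sorted(set(coordinates))
--
--     # Minimum: one greedy forward scan over distinct coordinates.
--     # Reuse the last occupied house if it is within reach (>= c-1),
--     # otherwise open a new house as far right as possible (c+1).
--     min_occupied = 0
--     last = None
--     for c in unique:
--         if last is None or last < c - 1:
--             last = c + 1
--             min_occupied += 1
--
--     # Maximum: one greedy forward scan over all coordinates,
--     # placing each person at the leftmost free cell it can reach
--     # (cells start at 0: last = -1 before any placement).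
--     max_occupied = 0
--     last = -1
--     for c in coordinates:
--         pos = max(last + 1, c - 1)
--         if pos <= c + 1:
--             last = pos
--             max_occupied += 1
--
--     return min_occupied, max_occupied
-- ===== Notes on version B (the rewrite author's own statement) =====
-- stated objective: simpler
-- what changed: Replaces A's in-place merging of the unique-coordinate array with index jumps plus a final set-cardinality count (min) and A's set accumulation (max) by two plain greedy forward scans that track only the last occupied cell and count placements.
import Mathlib
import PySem

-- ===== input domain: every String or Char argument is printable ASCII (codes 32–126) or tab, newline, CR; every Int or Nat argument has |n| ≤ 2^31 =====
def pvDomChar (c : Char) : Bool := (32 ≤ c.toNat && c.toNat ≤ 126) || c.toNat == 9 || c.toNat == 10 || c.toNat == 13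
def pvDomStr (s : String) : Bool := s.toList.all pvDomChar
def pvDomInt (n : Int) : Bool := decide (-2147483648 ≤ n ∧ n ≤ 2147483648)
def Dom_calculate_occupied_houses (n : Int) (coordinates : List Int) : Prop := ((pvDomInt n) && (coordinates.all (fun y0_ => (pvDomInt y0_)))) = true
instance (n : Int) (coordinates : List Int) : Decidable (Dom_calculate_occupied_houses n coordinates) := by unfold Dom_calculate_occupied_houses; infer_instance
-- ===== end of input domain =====

-- B replaces A's in-place array merging + final set count (min) and set accumulation (max) by two
-- plain counting greedy scans (objective: simpler). Both A and B sort `coordinates` in place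
-- (Python side); the equivalence proved here is about the return value.

-- ===== PORT A =====
-- A's while-loop over unique_coordinates, as the obvious zipper recursion on the same state:
-- `prev` holds positions < i in reverse, the second argument holds positions ≥ i.
def aMinLoop : List Int → List Int → List Int
  | prev, [] => prev.reverse
  | prev, c :: rest =>
    -- `if i - 1 >= 0 and u[i] - u[i-1] == 1: u[i] = u[i-1]` (the written value u[i-1] is c - 1)
    if prev.head? = some (c - 1) then
      aMinLoop ((c - 1) :: prev) rest
    else
      match rest with
      | [] => aMinLoop (c :: prev) []                                    -- i += 1, loop ends
      | d :: rest' =>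
        if d - c = 1 then aMinLoop (d :: d :: prev) rest'                -- u[i] = u[i+1]; i += 2
        else if d - c = 2 then aMinLoop ((c+1) :: (c+1) :: prev) rest'   -- u[i] = u[i+1] = u[i]+1; i += 2
        else aMinLoop (c :: prev) (d :: rest')                           -- i += 1
  termination_by _ rest => rest.length

-- body of A's `for coord in coordinates` loop; state = (last, max_occupied)
def aMaxStep (st : Int × PySem.Set Int) (coord : Int) : Int × PySem.Set Int :=
  if coord = st.1 then (coord + 1, PySem.Set.add st.2 (coord + 1))
  else if coord > st.1 then
    (if coord - 1 ≠ st.1 then (coord - 1, PySem.Set.add st.2 (coord - 1))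
     else (coord, PySem.Set.add st.2 coord))
  else st

def calculate_occupied_houses (n : Int) (coordinates : List Int) : Int × Int :=
  let coords := PySem.List.sorted coordinates (fun x => x) false
  let unique := PySem.List.sorted (PySem.Set.ofList coords) (fun x => x) false
  let min_occupied : Int := PySem.Set.len (PySem.Set.ofList (aMinLoop [] unique))
  let fin := coords.foldl aMaxStep (-1, PySem.Set.empty)
  (min_occupied, PySem.Set.len fin.2)

-- ===== PORT B =====
-- body of B's min loop; state = (min_occupied, last)
def bMinStep (st : Int × Option Int) (c : Int) : Int × Option Int :=
  match st.2 with
  | none => (st.1 + 1, some (c + 1))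
  | some l => if l < c - 1 then (st.1 + 1, some (c + 1)) else st

-- body of B's max loop; state = (max_occupied, last)
def bMaxStep (st : Int × Int) (c : Int) : Int × Int :=
  let pos := max (st.2 + 1) (c - 1)
  if pos ≤ c + 1 then (st.1 + 1, pos) else st

def calculate_occupied_houses_alt (n : Int) (coordinates : List Int) : Int × Int :=
  let coords := PySem.List.sorted coordinates (fun x => x) false
  let unique := PySem.List.sorted (PySem.Set.ofList coords) (fun x => x) false
  ((unique.foldl bMinStep (0, none)).1, (coords.foldl bMaxStep (0, -1)).1)

-- ===== PRECONDITION & SPEC =====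
def Spec_calculate_occupied_houses (n : Int) (coordinates : List Int) (out : Int × Int) : Prop := out = calculate_occupied_houses_alt n coordinates
instance (n : Int) (coordinates : List Int) (out : Int × Int) : Decidable (Spec_calculate_occupied_houses n coordinates out) := by unfold Spec_calculate_occupied_houses; infer_instance

-- ===== CLAIM (what is proved, stated in full; the proofs are below) =====
def Claim_equal_calculate_occupied_houses : Prop := ∀ (n : Int) (coordinates : List Int), Dom_calculate_occupied_houses n coordinates → Spec_calculate_occupied_houses n coordinates (calculate_occupied_houses n coordinates)

-- ===== LEMMAS AND PROOFS =====

-- B's min loop, recursively (only `last` matters for the count added from here on)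
def bmin : Option Int → List Int → Int
  | _, [] => 0
  | none, c :: r => 1 + bmin (some (c+1)) r
  | some l, c :: r => if l < c - 1 then 1 + bmin (some (c+1)) r else bmin (some l) r

lemma bfold_min (u : List Int) : ∀ (k : Int) (last : Option Int),
    (u.foldl bMinStep (k, last)).1 = k + bmin last u := by
  induction u with
  | nil => intro k last; simp [bmin]
  | cons c u ih =>
    intro k last
    cases last with
    | none => simp only [List.foldl_cons, bMinStep, bmin]; rw [ih]; ring
    | some l =>
      by_cases h : l < c - 1
      · simp only [List.foldl_cons, bMinStep, bmin, if_pos h]; rw [ih]; ring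
      · simp only [List.foldl_cons, bMinStep, bmin, if_neg h]; exact ih k (some l)

lemma bmin_skip (l : Int) (r : List Int) (h : ∀ x ∈ r, l < x - 1) :
    bmin (some l) r = bmin none r := by
  cases r with
  | nil => rfl
  | cons c r' => simp [bmin, h c (by simp)]

-- unfolding equations for aMinLoop
lemma aMinLoop_nil (prev : List Int) : aMinLoop prev [] = prev.reverse := by
  rw [aMinLoop.eq_def]

lemma aMinLoop_merge (prev : List Int) (c : Int) (rest : List Int)
    (h : prev.head? = some (c - 1)) :
    aMinLoop prev (c :: rest) = aMinLoop ((c - 1) :: prev) rest := by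
  rw [aMinLoop.eq_def]; simp [h]

lemma aMinLoop_single (prev : List Int) (c : Int) (h : prev.head? ≠ some (c - 1)) :
    aMinLoop prev [c] = (c :: prev).reverse := by
  rw [aMinLoop]; simp [h, aMinLoop_nil]

lemma aMinLoop_gap1 (prev : List Int) (c d : Int) (rest' : List Int)
    (h : prev.head? ≠ some (c - 1)) (hd : d - c = 1) :
    aMinLoop prev (c :: d :: rest') = aMinLoop (d :: d :: prev) rest' := by
  rw [aMinLoop]; simp [h, hd]

lemma aMinLoop_gap2 (prev : List Int) (c d : Int) (rest' : List Int)
    (h : prev.head? ≠ some (c - 1)) (hd1 : d - c ≠ 1) (hd2 : d - c = 2) :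
    aMinLoop prev (c :: d :: rest') = aMinLoop ((c+1) :: (c+1) :: prev) rest' := by
  rw [aMinLoop]; simp [h, hd2]

lemma aMinLoop_gap3 (prev : List Int) (c d : Int) (rest' : List Int)
    (h : prev.head? ≠ some (c - 1)) (hd1 : d - c ≠ 1) (hd2 : d - c ≠ 2) :
    aMinLoop prev (c :: d :: rest') = aMinLoop (c :: prev) (d :: rest') := by
  rw [aMinLoop]; simp [h, hd1, hd2]

lemma setlen_toFinset (l : List Int) : (PySem.Set.ofList l).length = l.toFinset.card := by
  have h1 : (PySem.Set.ofList l : List Int).Nodup := PySem.Set.nodup_ofList l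
  have h2 : (PySem.Set.ofList l : List Int).toFinset = l.toFinset := by
    ext x; simp [PySem.Set.mem_ofList]
  rw [← h2, List.toFinset_card_of_nodup h1]

lemma card_insert_int (x : Int) (l : List Int) (h : x ∉ l) :
    ((x :: l).toFinset.card : Int) = (l.toFinset.card : Int) + 1 := by
  rw [List.toFinset_cons, Finset.card_insert_of_notMem (by simpa using h)]
  push_cast
  ring

-- the heart of the min side: A's merging loop, started at a "clean" boundary
-- (everything already written is ≤ (next element) - 2), contributes exactly the
-- number of placements B's greedy makes on the remaining strictly increasing suffix.
lemma aMinLoop_card : ∀ (m : Nat) (u prev : List Int), u.length ≤ m →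
    u.Pairwise (· < ·) →
    (∀ c, u.head? = some c → ∀ x ∈ prev, x + 2 ≤ c) →
    ((aMinLoop prev u).toFinset.card : Int) = (prev.toFinset.card : Int) + bmin none u := by
  intro m
  induction m with
  | zero =>
    intro u prev hlen _ _
    have hu : u = [] := List.eq_nil_of_length_eq_zero (Nat.le_zero.mp hlen)
    subst hu
    rw [aMinLoop_nil, List.toFinset_reverse]
    simp [bmin]
  | succ m ih =>
    intro u prev hlen hpw hinv
    cases u with
    | nil => rw [aMinLoop_nil, List.toFinset_reverse]; simp [bmin]
    | cons c rest =>
      have hinvc : ∀ x ∈ prev, x + 2 ≤ c := hinv c rfl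
      have hhead : prev.head? ≠ some (c - 1) := by
        cases prev with
        | nil => simp
        | cons p ps =>
          simp only [List.head?_cons, ne_eq, Option.some.injEq]
          have := hinvc p (by simp)
          omega
      have hcnotin : c ∉ prev := fun hx => by have := hinvc c hx; omega
      cases rest with
      | nil =>
        rw [aMinLoop_single _ _ hhead, List.toFinset_reverse, card_insert_int c prev hcnotin]
        simp [bmin]
      | cons d rest' =>
        have hcd : c < d := (List.pairwise_cons.mp hpw).1 d (by simp)
        have hpwr : (d :: rest').Pairwise (· < ·) := (List.pairwise_cons.mp hpw).2
        have hdall : ∀ x ∈ rest', d < x := (List.pairwise_cons.mp hpwr).1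
        have hpwr' : rest'.Pairwise (· < ·) := (List.pairwise_cons.mp hpwr).2
        have hdnotin : d ∉ prev := fun hx => by have := hinvc d hx; omega
        by_cases hd1 : d - c = 1
        · rw [aMinLoop_gap1 _ _ _ _ hhead hd1]
          cases rest' with
          | nil =>
            rw [aMinLoop_nil, List.toFinset_reverse]
            rw [show (d :: d :: prev).toFinset = (d :: prev).toFinset from by
              simp [List.toFinset_cons]]
            rw [card_insert_int d prev hdnotin]
            simp [bmin, show ¬ (c + 1 < d - 1) from by omega]
          | cons e r'' =>
            have hde : d < e := hdall e (by simp)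
            have heall : ∀ x ∈ r'', e < x := (List.pairwise_cons.mp hpwr').1
            have hpwr'' : r''.Pairwise (· < ·) := (List.pairwise_cons.mp hpwr').2
            by_cases he : e - d = 1
            · rw [aMinLoop_merge _ _ _ (show (d :: d :: prev).head? = some (e - 1) from by
                simp; omega)]
              have he1 : e - 1 = d := by omega
              rw [he1]
              have hstep := ih r'' (d :: d :: d :: prev)
                (by simp at hlen ⊢; omega) hpwr''
                (by
                  intro f hf x hx
                  have hef : e < f := by
                    cases r'' with
                    | nil => simp at hf
                    | cons g r3 =>
                      have : g = f := by simpa using hf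
                      subst this
                      exact heall g (by simp)
                  have hx' : x = d ∨ x ∈ prev := by simpa using hx
                  rcases hx' with rfl | hmem
                  · omega
                  · have := hinvc x hmem; omega)
              rw [hstep]
              rw [show (d :: d :: d :: prev).toFinset = (d :: prev).toFinset from by
                simp [List.toFinset_cons]]
              rw [card_insert_int d prev hdnotin]
              have hb : bmin none (c :: d :: e :: r'') = 1 + bmin none r'' := by
                have hskip : bmin (some (c+1)) r'' = bmin none r'' := by
                  apply bmin_skip
                  intro x hx
                  have := heall x hx; omega
                simp [bmin, show ¬ (c + 1 < d - 1) from by omega,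
                  show ¬ (c + 1 < e - 1) from by omega, hskip]
              rw [hb]
              push_cast
              ring
            · have hstep := ih (e :: r'') (d :: d :: prev)
                (by simp at hlen ⊢; omega) hpwr'
                (by
                  intro f hf x hx
                  have hef : e = f := by simpa using hf
                  subst hef
                  have hx' : x = d ∨ x ∈ prev := by simpa using hx
                  rcases hx' with rfl | hmem
                  · omega
                  · have := hinvc x hmem; omega)
              rw [hstep]
              rw [show (d :: d :: prev).toFinset = (d :: prev).toFinset from by
                simp [List.toFinset_cons]]
              rw [card_insert_int d prev hdnotin]
              have hb : bmin none (c :: d :: e :: r'') = 1 + bmin none (e :: r'') := by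
                have hskip : bmin (some (c+1)) (e :: r'') = bmin none (e :: r'') := by
                  apply bmin_skip
                  intro x hx
                  simp at hx
                  rcases hx with hx | hx
                  · omega
                  · have := heall x hx; omega
                rw [show bmin none (c :: d :: e :: r'') = 1 + bmin (some (c+1)) (d :: e :: r'') from rfl]
                rw [show bmin (some (c+1)) (d :: e :: r'') = bmin (some (c+1)) (e :: r'') from by
                  simp [bmin, show ¬ (c + 1 < d - 1) from by omega]]
                rw [hskip]
              rw [hb]
              push_cast
              ring
        · by_cases hd2 : d - c = 2
          · rw [aMinLoop_gap2 _ _ _ _ hhead hd1 hd2]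
            have hc1notin : (c+1) ∉ prev := fun hx => by have := hinvc (c+1) hx; omega
            have hstep := ih rest' ((c+1) :: (c+1) :: prev)
              (by simp at hlen ⊢; omega) hpwr'
              (by
                intro f hf x hx
                have hdf : d < f := by
                  cases rest' with
                  | nil => simp at hf
                  | cons g r3 =>
                    have : g = f := by simpa using hf
                    subst this
                    exact hdall g (by simp)
                have hx' : x = c + 1 ∨ x ∈ prev := by simpa using hx
                rcases hx' with rfl | hmem
                · omega
                · have := hinvc x hmem; omega)
            rw [hstep]
            rw [show ((c+1) :: (c+1) :: prev).toFinset = ((c+1) :: prev).toFinset from by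
              simp [List.toFinset_cons]]
            rw [card_insert_int (c+1) prev hc1notin]
            have hb : bmin none (c :: d :: rest') = 1 + bmin none rest' := by
              have hskip : bmin (some (c+1)) rest' = bmin none rest' := by
                apply bmin_skip
                intro x hx
                have := hdall x hx; omega
              simp [bmin, show ¬ (c + 1 < d - 1) from by omega, hskip]
            rw [hb]
            push_cast
            ring
          · rw [aMinLoop_gap3 _ _ _ _ hhead hd1 hd2]
            have hstep := ih (d :: rest') (c :: prev)
              (by simp at hlen ⊢; omega) hpwr
              (by
                intro f hf x hx
                have hdf : d = f := by simpa using hf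
                subst hdf
                have hx' : x = c ∨ x ∈ prev := by simpa using hx
                rcases hx' with rfl | hmem
                · omega
                · have := hinvc x hmem; omega)
            rw [hstep]
            rw [card_insert_int c prev hcnotin]
            have hb : bmin none (c :: d :: rest') = 1 + bmin none (d :: rest') := by
              have hskip : bmin (some (c+1)) (d :: rest') = bmin none (d :: rest') := by
                apply bmin_skip
                intro x hx
                simp at hx
                rcases hx with hx | hx
                · omega
                · have := hdall x hx; omega
              rw [show bmin none (c :: d :: rest') = 1 + bmin (some (c + 1)) (d :: rest') from rfl,
                hskip]
            rw [hb]
            push_cast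
            ring

lemma max_sim : ∀ (s : List Int) (lastv cnt : Int) (occ : List Int),
    ((occ.length : Int) = cnt) → (∀ x ∈ occ, x ≤ lastv) →
    (((s.foldl aMaxStep (lastv, occ)).2.length : Int) = (s.foldl bMaxStep (cnt, lastv)).1
      ∧ (s.foldl aMaxStep (lastv, occ)).1 = (s.foldl bMaxStep (cnt, lastv)).2) := by
  intro s
  induction s with
  | nil =>
    intro lastv cnt occ hlen hle
    exact ⟨hlen, rfl⟩
  | cons c s ih =>
    intro lastv cnt occ hlen hle
    simp only [List.foldl_cons]
    by_cases hc : c = lastv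
    · subst hc
      have hnot : (c+1) ∉ occ := fun h => by have := hle _ h; omega
      rw [show aMaxStep (c, occ) c = (c+1, occ ++ [c+1]) from by
        simp [aMaxStep, PySem.Set.add_of_not_mem hnot]]
      rw [show bMaxStep (cnt, c) c = (cnt+1, c+1) from by
        simp [bMaxStep, show max (c+1) (c-1) = c + 1 from by omega]]
      apply ih
      · simp; omega
      · intro x hx
        rcases List.mem_append.mp hx with hx | hx
        · have := hle x hx; omega
        · simp at hx; omega
    · by_cases hgt : lastv < c
      · by_cases hne : c - 1 = lastv
        · have hnot : c ∉ occ := fun h => by have := hle _ h; omega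
          rw [show aMaxStep (lastv, occ) c = (c, occ ++ [c]) from by
            simp [aMaxStep, hc, hgt, hne, PySem.Set.add_of_not_mem hnot]]
          rw [show bMaxStep (cnt, lastv) c = (cnt+1, c) from by
            simp only [bMaxStep]
            rw [show max (lastv+1) (c-1) = c from by omega]
            simp [show c ≤ c + 1 from by omega]]
          apply ih
          · simp; omega
          · intro x hx
            rcases List.mem_append.mp hx with hx | hx
            · have := hle x hx; omega
            · simp at hx; omega
        · have hnot : (c-1) ∉ occ := fun h => by have := hle _ h; omega
          rw [show aMaxStep (lastv, occ) c = (c-1, occ ++ [c-1]) from by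
            simp [aMaxStep, hc, hgt, hne, PySem.Set.add_of_not_mem hnot]]
          rw [show bMaxStep (cnt, lastv) c = (cnt+1, c-1) from by
            simp only [bMaxStep]
            rw [show max (lastv+1) (c-1) = c - 1 from by omega]
            simp [show c - 1 ≤ c + 1 from by omega]]
          apply ih
          · simp; omega
          · intro x hx
            rcases List.mem_append.mp hx with hx | hx
            · have := hle x hx; omega
            · simp at hx; omega
      · rw [show aMaxStep (lastv, occ) c = (lastv, occ) from by
          simp [aMaxStep, hc, show ¬ lastv < c from hgt]]
        rw [show bMaxStep (cnt, lastv) c = (cnt, lastv) from by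
          simp only [bMaxStep]
          rw [show max (lastv+1) (c-1) = lastv + 1 from by omega]
          simp
          omega]
        exact ih lastv cnt occ hlen hle

-- ===== VERDICT (by name: the statement is the Claim_ definition above) =====
theorem calculate_occupied_houses_spec : Claim_equal_calculate_occupied_houses := by
  intro n coordinates _
  unfold Spec_calculate_occupied_houses calculate_occupied_houses calculate_occupied_houses_alt
  simp only []
  rw [Prod.mk.injEq]
  constructor
  · -- min side
    have hpw : (PySem.List.sorted (PySem.Set.ofList (PySem.List.sorted coordinates (fun x => x) false))
        (fun x => x) false).Pairwise (· < ·) :=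
      PySem.List.sorted_ofList_pairwise_lt (PySem.List.sorted coordinates (fun x => x) false)
    set u := PySem.List.sorted (PySem.Set.ofList (PySem.List.sorted coordinates (fun x => x) false))
        (fun x => x) false with hu
    have hk := aMinLoop_card u.length u [] le_rfl hpw (by intro c _ x hx; simp at hx)
    simp only [List.toFinset_nil, Finset.card_empty] at hk
    rw [bfold_min]
    simp only [PySem.Set.len, setlen_toFinset]
    push_cast at hk ⊢
    omega
  · -- max side
    have h := max_sim (PySem.List.sorted coordinates (fun x => x) false) (-1) 0 [] (by simp)
      (by intro x hx; simp at hx)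
    simp only [PySem.Set.len, PySem.Set.empty] at h ⊢
    exact h.1
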